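-- pv_equiv track=rewrite | github.com/nocresso/42-CURSUS | Python Modules/Python03/ex5/ft_data_stream.py | game_events
-- ===== SOURCE A (Python) =====
-- from typing import Generator
--
-- def game_events(n: int) -> Generator[tuple[str, str, int], None, None]:
--     '''Game events generator'''
--     players = ["Alice", "Bob", "Charlie", "Paul"]
--     actions = ["killed a monster", "found treasure",
--                "leveled up", "eat an apple"]
--     levels = [5, 12, 8, 10, 4, 34, 10, 6, 23, 6, 25, 16]
--     for i in range(n):
--         player = players[i % len(players)]
--         action = actions[i % len(actions)]
--         level = levels[i % len(levels)]
--         yield player, action, level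
-- ===== SOURCE B (Python) =====
-- def game_events(n: int):
--     '''Game events generator'''
--     players = ["Alice", "Bob", "Charlie", "Paul"]
--     actions = ["killed a monster", "found treasure",
--                "leveled up", "eat an apple"]
--     levels = [5, 12, 8, 10, 4, 34, 10, 6, 23, 6, 25, 16]
--     if n <= 0:
--         return
--     # one full period: lcm(4, 4, 12) = 12 combined events
--     period = list(zip(players * 3, actions * 3, levels))
--     q, r = divmod(n, 12)
--     for _ in range(q):
--         yield from period
--     yield from period[:r]
-- ===== Notes on version B (the rewrite author's own statement) =====
-- stated objective: alternative
-- what changed: Replaced the per-step modular indexing loop (three i%len lookups per event) by precomputing one combined 12-event period (the lcm of the cycle lengths) with zip and emitting q full periods plus a remainder slice via divmod.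
import Mathlib
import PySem

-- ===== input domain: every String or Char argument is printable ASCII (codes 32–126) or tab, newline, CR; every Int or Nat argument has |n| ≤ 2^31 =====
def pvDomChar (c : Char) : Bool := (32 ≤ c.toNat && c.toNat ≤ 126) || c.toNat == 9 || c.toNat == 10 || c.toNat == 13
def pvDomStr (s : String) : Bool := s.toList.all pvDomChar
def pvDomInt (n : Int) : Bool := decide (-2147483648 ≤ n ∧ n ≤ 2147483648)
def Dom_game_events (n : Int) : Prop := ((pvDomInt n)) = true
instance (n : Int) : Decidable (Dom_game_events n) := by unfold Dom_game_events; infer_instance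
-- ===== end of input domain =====

-- B precomputes one 12-event period (lcm of the cycle lengths) with zip and emits
-- q full periods plus a remainder slice via divmod(n, 12); A indexes with i % len each step.

-- ===== PORT A =====
def pvPlayersA : List String := ["Alice", "Bob", "Charlie", "Paul"]
def pvActionsA : List String := ["killed a monster", "found treasure", "leveled up", "eat an apple"]
def pvLevelsA : List Int := [5, 12, 8, 10, 4, 34, 10, 6, 23, 6, 25, 16]

-- the generator's yields, in order: for i in range(n): yield (players[i%4], actions[i%4], levels[i%12])
def game_events (n : Int) : List (String × String × Int) :=
  (PySem.List.pyRange 0 n 1).map (fun i =>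
    (PySem.List.pyGetD pvPlayersA (PySem.Int.mod i (pvPlayersA.length : Int)) "",
     PySem.List.pyGetD pvActionsA (PySem.Int.mod i (pvActionsA.length : Int)) "",
     PySem.List.pyGetD pvLevelsA (PySem.Int.mod i (pvLevelsA.length : Int)) 0))

-- ===== PORT B =====
def pvPlayersB : List String := ["Alice", "Bob", "Charlie", "Paul"]
def pvActionsB : List String := ["killed a monster", "found treasure", "leveled up", "eat an apple"]
def pvLevelsB : List Int := [5, 12, 8, 10, 4, 34, 10, 6, 23, 6, 25, 16]

-- period = list(zip(players * 3, actions * 3, levels))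
def pvPeriod : List (String × String × Int) :=
  List.zip (pvPlayersB ++ pvPlayersB ++ pvPlayersB)
           (List.zip (pvActionsB ++ pvActionsB ++ pvActionsB) pvLevelsB)

-- divmod(n, 12) with the literal nonzero divisor 12 is (floordiv n 12, mod n 12)
def game_events_alt (n : Int) : List (String × String × Int) :=
  if n ≤ 0 then []
  else
    let q := PySem.Int.floordiv n 12
    let r := PySem.Int.mod n 12
    (List.replicate q.toNat pvPeriod).flatten ++ PySem.List.slice pvPeriod none (some r)

-- ===== PRECONDITION & SPEC =====
def Spec_game_events (n : Int) (out : List (String × String × Int)) : Prop := out = game_events_alt n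
instance (n : Int) (out : List (String × String × Int)) : Decidable (Spec_game_events n out) := by unfold Spec_game_events; infer_instance

-- ===== CLAIM (what is proved, stated in full; the proofs are below) =====
def Claim_equal_game_events : Prop := ∀ (n : Int), Dom_game_events n → Spec_game_events n (game_events n)

-- ===== LEMMAS AND PROOFS =====

-- A's per-step tuple, as a function of the Nat loop index
def pvStep (k : Nat) : String × String × Int :=
  (pvPlayersA.getD (k % 4) "", pvActionsA.getD (k % 4) "", pvLevelsA.getD (k % 12) 0)

lemma pvStep_eq_period (k : Nat) : pvStep k = pvPeriod.getD (k % 12) ("", "", 0) := by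
  have h4 : k % 4 = k % 12 % 4 := (Nat.mod_mod_of_dvd k (by norm_num)).symm
  have h12 : k % 12 < 12 := Nat.mod_lt _ (by norm_num)
  rw [pvStep, h4]
  interval_cases h : k % 12 <;> rfl

lemma pvStep_add_twelve (k : Nat) : pvStep (12 + k) = pvStep k := by
  have h1 : (12 + k) % 4 = k % 4 := by omega
  have h2 : (12 + k) % 12 = k % 12 := by omega
  simp [pvStep, h1, h2]

lemma pvRange_map_step (m : Nat) (hm : m ≤ 12) :
    (List.range m).map pvStep = pvPeriod.take m := by
  apply List.ext_getElem
  · simp [pvPeriod, pvPlayersB, pvActionsB, pvLevelsB]; omega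
  · intro i h1 h2
    simp only [List.getElem_map, List.getElem_range, List.getElem_take]
    rw [pvStep_eq_period, Nat.mod_eq_of_lt (by simp at h1; omega)]
    rw [List.getD_eq_getElem]

lemma pvCycle (q r : Nat) (hr : r ≤ 12) :
    (List.range (q * 12 + r)).map pvStep
      = (List.replicate q pvPeriod).flatten ++ pvPeriod.take r := by
  induction q with
  | zero => simpa using pvRange_map_step r hr
  | succ q ih =>
      have : (q + 1) * 12 + r = 12 + (q * 12 + r) := by ring
      rw [this, List.range_add, List.map_append, List.map_map]
      have h12 : (List.range 12).map pvStep = pvPeriod.take 12 := pvRange_map_step 12 le_rfl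
      have htake : pvPeriod.take 12 = pvPeriod := by rfl
      have hcomp : ((List.range (q * 12 + r)).map (pvStep ∘ (12 + ·)))
          = (List.range (q * 12 + r)).map pvStep := by
        apply List.map_congr_left; intro k _; exact pvStep_add_twelve k
      rw [h12, htake, hcomp, ih, List.replicate_succ, List.flatten_cons, List.append_assoc]

lemma game_events_eq_map (n : Int) :
    game_events n = (List.range n.toNat).map pvStep := by
  rw [game_events, PySem.List.pyRange_one]
  rw [List.map_map]
  simp only [Int.sub_zero]
  apply List.map_congr_left
  intro k _
  simp only [Function.comp_apply, zero_add, pvStep]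
  have h4 : PySem.Int.mod (k : Int) ((4 : Nat) : Int) = ((k % 4 : Nat) : Int) :=
    PySem.Int.mod_natCast k 4
  have h12 : PySem.Int.mod (k : Int) ((12 : Nat) : Int) = ((k % 12 : Nat) : Int) :=
    PySem.Int.mod_natCast k 12
  have hp : (pvPlayersA.length : Int) = ((4 : Nat) : Int) := by rfl
  have ha : (pvActionsA.length : Int) = ((4 : Nat) : Int) := by rfl
  have hl : (pvLevelsA.length : Int) = ((12 : Nat) : Int) := by rfl
  rw [hp, ha, hl, h4, h12]
  rw [PySem.List.pyGetD_natCast, PySem.List.pyGetD_natCast, PySem.List.pyGetD_natCast]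

-- ===== VERDICT (by name: the statement is the Claim_ definition above) =====
theorem game_events_spec : Claim_equal_game_events := by
  intro n _
  show game_events n = game_events_alt n
  rw [game_events_eq_map]
  simp only [game_events_alt]
  split_ifs with h
  · have : n.toNat = 0 := by omega
    simp [this]
  · have hn : 0 < n := by omega
    have hq : PySem.Int.floordiv n 12 = n / 12 := PySem.Int.floordiv_eq_ediv_of_pos (by norm_num)
    have hr : PySem.Int.mod n 12 = n % 12 := PySem.Int.mod_eq_emod_of_pos (by norm_num)
    have hr0 : 0 ≤ n % 12 := Int.emod_nonneg n (by norm_num)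
    rw [hq, hr, PySem.List.slice_to pvPeriod hr0]
    have hsplit : n.toNat = (n / 12).toNat * 12 + (n % 12).toNat := by omega
    rw [hsplit]
    exact pvCycle _ _ (by omega)
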